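-- pv_equiv track=rewrite | github.com/ravish-oo/arc-agi-oo-v2 | src/fy.py | mk_rowcol_blocks
-- ===== SOURCE A (Python) =====
-- from typing import List, Dict, Tuple, Optional, Literal, NamedTuple, Set
--
-- def mk_rowcol_blocks(labels: List[int], h: int, w: int) -> Tuple[List[List[int]], List[List[int]]]:
--     """
--     Build row and column equivalence blocks based on label signatures.
--
--     Rows with identical label signatures are grouped together.
--     Same for columns.
--     """
--     # Build row signatures
--     row_sigs = {}
--     for r in range(h):
--         sig = tuple(labels[r * w + c] for c in range(w))
--         if sig not in row_sigs:
--             row_sigs[sig] = []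
--         row_sigs[sig].append(r)
--     row_blocks = [sorted(indices) for indices in row_sigs.values()]
--
--     # Build col signatures
--     col_sigs = {}
--     for c in range(w):
--         sig = tuple(labels[r * w + c] for r in range(h))
--         if sig not in col_sigs:
--             col_sigs[sig] = []
--         col_sigs[sig].append(c)
--     col_blocks = [sorted(indices) for indices in col_sigs.values()]
--
--     return row_blocks, col_blocks
-- ===== SOURCE B (Python) =====
-- def mk_rowcol_blocks(labels, h, w):
--     """Representative-based grouping: no dicts, no signature tuples.
--     leader(i) = first index whose line equals line i; blocks are the
--     fibers of the leader map, listed in leader order."""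
--     def row_eq(a, b):
--         return all(labels[a * w + c] == labels[b * w + c] for c in range(w))
--
--     def col_eq(a, b):
--         return all(labels[r * w + a] == labels[r * w + b] for r in range(h))
--
--     def blocks(n, eq):
--         def leader(i):
--             return next(j for j in range(i + 1) if eq(j, i))
--         return [[i for i in range(n) if leader(i) == j]
--                 for j in range(n) if leader(j) == j]
--
--     return blocks(h, row_eq), blocks(w, col_eq)
-- ===== Notes on version B (the rewrite author's own statement) =====
-- stated objective: alternative
-- what changed: B drops A's signature-tuple dictionaries entirely: it compares rows/columns pairwise cell by cell, assigns each index the first earlier index with an equal line as its leader, and emits the fibers of the leader map in leader order, which reproduces A's first-occurrence block order and ascending indices without any hashing or sorting.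
import Mathlib
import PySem

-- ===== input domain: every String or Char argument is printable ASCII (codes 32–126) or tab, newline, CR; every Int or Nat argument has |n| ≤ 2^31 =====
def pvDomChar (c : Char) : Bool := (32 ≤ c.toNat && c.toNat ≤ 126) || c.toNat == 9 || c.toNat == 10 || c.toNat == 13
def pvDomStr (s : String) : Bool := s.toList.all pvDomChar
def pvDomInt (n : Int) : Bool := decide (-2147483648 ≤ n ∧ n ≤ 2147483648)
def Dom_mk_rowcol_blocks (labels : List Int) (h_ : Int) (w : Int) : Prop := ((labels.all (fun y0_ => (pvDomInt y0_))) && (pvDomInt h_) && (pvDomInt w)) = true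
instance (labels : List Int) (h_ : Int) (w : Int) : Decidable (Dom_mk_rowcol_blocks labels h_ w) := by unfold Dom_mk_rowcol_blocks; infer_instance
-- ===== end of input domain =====

-- ===== PORT A =====
-- B replaces A's signature-tuple dictionaries by leader-based pairwise grouping (objective: alternative, no speed claim).
def mk_rowcol_blocks (labels : List Int) (h_ : Int) (w : Int) : List (List Int) × List (List Int) :=
  -- labels[r*w+c] raises IndexError out of range; pyGetD's default is only reached outside
  -- Pre_mk_rowcol_blocks (r,c ≥ 0, so the index is never negative)
  let row_sigs := (PySem.List.pyRange 0 h_ 1).foldl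
    (fun d r =>
      let sig := (PySem.List.pyRange 0 w 1).map (fun c => PySem.List.pyGetD labels (r * w + c) 0)
      let d := if d.contains sig then d else d.insert sig ([] : List Int)
      d.modify sig [] (fun l => l ++ [r]))
    PySem.Dict.empty
  let row_blocks := row_sigs.values.map (fun v => PySem.List.sorted v (fun x => x) false)
  let col_sigs := (PySem.List.pyRange 0 w 1).foldl
    (fun d c =>
      let sig := (PySem.List.pyRange 0 h_ 1).map (fun r => PySem.List.pyGetD labels (r * w + c) 0)
      let d := if d.contains sig then d else d.insert sig ([] : List Int)
      d.modify sig [] (fun l => l ++ [c]))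
    PySem.Dict.empty
  let col_blocks := col_sigs.values.map (fun v => PySem.List.sorted v (fun x => x) false)
  (row_blocks, col_blocks)

-- ===== PORT B =====
-- row_eq / col_eq: cell-by-cell comparison of two rows (resp. columns)
def pvRowEq (labels : List Int) (w : Int) (a b : Int) : Bool :=
  (PySem.List.pyRange 0 w 1).all
    (fun c => PySem.List.pyGetD labels (a * w + c) 0 == PySem.List.pyGetD labels (b * w + c) 0)

def pvColEq (labels : List Int) (h_ w : Int) (a b : Int) : Bool :=
  (PySem.List.pyRange 0 h_ 1).all
    (fun r => PySem.List.pyGetD labels (r * w + a) 0 == PySem.List.pyGetD labels (r * w + b) 0)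

-- leader(i) = next(j for j in range(i+1) if eq(j, i)); the generator always yields
-- (eq(i,i) is true), so .getD i is a totality default that is never reached
def pvLeader (eqf : Int → Int → Bool) (i : Int) : Int :=
  ((PySem.List.pyRange 0 (i + 1) 1).find? (fun j => eqf j i)).getD i

-- [[i for i in range(n) if leader(i)==j] for j in range(n) if leader(j)==j]
def pvBlocks (n : Int) (eqf : Int → Int → Bool) : List (List Int) :=
  ((PySem.List.pyRange 0 n 1).filter (fun j => pvLeader eqf j == j)).map
    (fun j => (PySem.List.pyRange 0 n 1).filter (fun i => pvLeader eqf i == j))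

def mk_rowcol_blocks_alt (labels : List Int) (h_ : Int) (w : Int) : List (List Int) × List (List Int) :=
  (pvBlocks h_ (pvRowEq labels w), pvBlocks w (pvColEq labels h_ w))

-- ===== PRECONDITION & SPEC =====
-- Pre_ excludes exactly the inputs where the Python programs raise IndexError: a positive grid
-- whose labels list is shorter than h*w (the largest index read is h*w-1).
def Pre_mk_rowcol_blocks (labels : List Int) (h_ : Int) (w : Int) : Prop :=
  0 < h_ → 0 < w → h_ * w ≤ (labels.length : Int)
instance (labels : List Int) (h_ : Int) (w : Int) : Decidable (Pre_mk_rowcol_blocks labels h_ w) := by unfold Pre_mk_rowcol_blocks; infer_instance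
def pvWitness_mk_rowcol_blocks : List Int × Int × Int := ([0, 1, 0, 1], 2, 2)
def Spec_mk_rowcol_blocks (labels : List Int) (h_ : Int) (w : Int) (out : List (List Int) × List (List Int)) : Prop := out = mk_rowcol_blocks_alt labels h_ w
instance (labels : List Int) (h_ : Int) (w : Int) (out : List (List Int) × List (List Int)) : Decidable (Spec_mk_rowcol_blocks labels h_ w out) := by unfold Spec_mk_rowcol_blocks; infer_instance

-- ===== CLAIM (what is proved, stated in full; the proofs are below) =====
def Claim_equal_mk_rowcol_blocks : Prop := ∀ (labels : List Int) (h_ : Int) (w : Int), Dom_mk_rowcol_blocks labels h_ w → Pre_mk_rowcol_blocks labels h_ w → Spec_mk_rowcol_blocks labels h_ w (mk_rowcol_blocks labels h_ w)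

-- ===== LEMMAS AND PROOFS =====

-- A's "if sig not in d: d[sig] = []; d[sig].append(r)" is one Dict.modify
theorem pv_stepA {d : PySem.Dict (List Int) (List Int)} {k : List Int} {r : Int} :
    (if d.contains k then d else d.insert k ([] : List Int)).modify k [] (fun l => l ++ [r])
      = d.modify k [] (fun l => l ++ [r]) := by
  by_cases h : d.contains k
  · simp [h]
  · rw [Bool.not_eq_true] at h
    simp only [h, Bool.false_eq_true, if_false, PySem.Dict.modify,
      PySem.Dict.getD_insert_self, PySem.Dict.insert_insert_self,
      PySem.Dict.getD_of_not_contains d ([] : List Int) h]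

-- all-cells-equal is equality of the mapped signatures
theorem pv_all_eq_map {α : Type} [DecidableEq α] (L : List Int) (f g : Int → α) :
    (L.all (fun c => f c == g c)) = (L.map f == L.map g) := by
  induction L with
  | nil => rfl
  | cons x xs ih => simp [List.all_cons, ih]

-- leader over the prefix range(i+1) is the first matching index of the full range(n)
theorem pv_leader_full (sig : Int → List Int) (n i : Int) (h0 : 0 ≤ i) (hn : i < n) :
    pvLeader (fun a b => sig a == sig b) i
      = ((PySem.List.pyRange 0 n 1).find? (fun j => sig j == sig i)).getD i := by
  unfold pvLeader
  rw [PySem.List.pyRange_one_append 0 (i + 1) n (by omega) (by omega), List.find?_append]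
  have hs : ((PySem.List.pyRange 0 (i + 1) 1).find? (fun j => sig j == sig i)).isSome := by
    rw [List.find?_isSome]
    exact ⟨i, by rw [PySem.List.mem_pyRange_one]; omega, by simp⟩
  cases hfind : (PySem.List.pyRange 0 (i + 1) 1).find? (fun j => sig j == sig i) with
  | none => rw [hfind] at hs; simp at hs
  | some b => simp

-- ordered dedup of the signatures = signatures of the first-occurrence indices
theorem pv_dedup_firsts (sig : Int → List Int) (L : List Int) (hnd : L.Nodup) :
    PySem.Set.ofList (L.map sig)
      = (L.filter (fun j => L.find? (fun a => sig a == sig j) == some j)).map sig := by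
  induction L using List.reverseRecOn with
  | nil => rfl
  | append_singleton L x ih =>
    rw [List.nodup_append] at hnd
    obtain ⟨hndL, -, hdisj⟩ := hnd
    have hx : x ∉ L := fun hm => hdisj x hm x (by simp) rfl
    have key : ∀ j ∈ L, (((L ++ [x]).find? (fun a => sig a == sig j) == some j) : Bool)
                      = ((L.find? (fun a => sig a == sig j) == some j) : Bool) := by
      intro j hj
      rw [List.find?_append]
      cases hf : L.find? (fun a => sig a == sig j) with
      | none =>
        exfalso
        have hs : (L.find? (fun a => sig a == sig j)).isSome :=
          List.find?_isSome.mpr ⟨j, hj, by simp⟩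
        rw [hf] at hs; simp at hs
      | some b => simp
    have hofl : PySem.Set.ofList ((L ++ [x]).map sig)
        = PySem.Set.add (PySem.Set.ofList (L.map sig)) (sig x) := by
      rw [List.map_append, PySem.Set.ofList_eq_foldl, List.foldl_append,
        ← PySem.Set.ofList_eq_foldl]
      rfl
    rw [hofl, List.filter_append, List.filter_congr key]
    cases hf : L.find? (fun a => sig a == sig x) with
    | some b =>
      have hbL := List.mem_of_find?_eq_some hf
      have hbx : b ≠ x := fun h => hx (h ▸ hbL)
      have hmem : sig x ∈ L.map sig := by
        have hb := List.find?_some hf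
        exact List.mem_map.mpr ⟨b, hbL, by simpa using hb⟩
      have hpx : (([x] : List Int).filter
          (fun j => (L ++ [x]).find? (fun a => sig a == sig j) == some j)) = [] := by
        simp only [List.filter, List.find?_append, hf]
        rw [show ((some b).or ([x].find? (fun a => sig a == sig x)) == some x) = false from by
          simp [hbx]]
      rw [hpx, List.append_nil, ← ih hndL]
      simp [PySem.Set.add, PySem.Set.contains, PySem.Set.mem_ofList, hmem]
    | none =>
      have hmem : sig x ∉ L.map sig := by
        intro hm
        obtain ⟨a, haL, hax⟩ := List.mem_map.mp hm
        have hs : (L.find? (fun a => sig a == sig x)).isSome :=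
          List.find?_isSome.mpr ⟨a, haL, by simp [hax]⟩
        rw [hf] at hs; simp at hs
      have hpx : (([x] : List Int).filter
          (fun j => (L ++ [x]).find? (fun a => sig a == sig j) == some j)) = [x] := by
        simp only [List.filter, List.find?_append, hf]
        simp
      rw [hpx, List.map_append, ← ih hndL]
      simp [PySem.Set.add, PySem.Set.contains, PySem.Set.mem_ofList, hmem]

-- the common normal form of both sides
theorem pv_blocks_eq (sig : Int → List Int) (n : Int) :
    ((PySem.List.pyRange 0 n 1).foldl
        (fun d r =>
          let d := if d.contains (sig r) then d else d.insert (sig r) ([] : List Int)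
          d.modify (sig r) [] (fun l => l ++ [r]))
        PySem.Dict.empty).values.map (fun v => PySem.List.sorted v (fun x => x) false)
      = pvBlocks n (fun a b => sig a == sig b) := by
  have hA : ((PySem.List.pyRange 0 n 1).foldl
        (fun d r =>
          let d := if d.contains (sig r) then d else d.insert (sig r) ([] : List Int)
          d.modify (sig r) [] (fun l => l ++ [r]))
        PySem.Dict.empty)
      = (PySem.List.pyRange 0 n 1).foldl
          (fun d r => d.modify (sig r) [] (fun l => l ++ [r])) PySem.Dict.empty := by
    simp only [pv_stepA]
  rw [hA]
  have hnd : ((PySem.List.pyRange 0 n 1).foldl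
      (fun d r => d.modify (sig r) [] (fun l => l ++ [r])) PySem.Dict.empty).keys.Nodup :=
    PySem.Dict.nodup_keys_foldl_modify_key (PySem.List.pyRange 0 n 1) sig []
      (fun _ r => fun l => l ++ [r]) PySem.Dict.empty (by simp)
  rw [PySem.Dict.values_eq_map_keys _ hnd ([] : List Int)]
  have hkeys : ((PySem.List.pyRange 0 n 1).foldl
      (fun d r => d.modify (sig r) [] (fun l => l ++ [r])) PySem.Dict.empty).keys
      = PySem.Set.ofList ((PySem.List.pyRange 0 n 1).map sig) := by
    rw [PySem.Dict.keys_foldl_modify_key (PySem.List.pyRange 0 n 1) sig []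
      (fun _ r => fun l => l ++ [r]) PySem.Dict.empty]
    simp [PySem.Set.update, PySem.Set.ofList_eq_foldl, PySem.Dict.keys_empty]
  have hget : ∀ k, ((PySem.List.pyRange 0 n 1).foldl
      (fun d r => d.modify (sig r) [] (fun l => l ++ [r])) PySem.Dict.empty).getD k []
      = (PySem.List.pyRange 0 n 1).filter (fun r => sig r == k) := by
    intro k
    rw [show ((PySem.List.pyRange 0 n 1).foldl
        (fun d r => d.modify (sig r) [] (fun l => l ++ [r])) PySem.Dict.empty)
      = (((PySem.List.pyRange 0 n 1).map (fun r => (sig r, r))).foldl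
          (fun d p => d.modify p.1 [] (fun l => l ++ [p.2])) PySem.Dict.empty) from by
        rw [List.foldl_map]]
    rw [PySem.Dict.getD_foldl_modify_append]
    rw [List.filter_map]
    simp [Function.comp_def]
  rw [hkeys]
  -- B side
  have hleadR : ∀ i ∈ PySem.List.pyRange 0 n 1,
      pvLeader (fun a b => sig a == sig b) i
        = ((PySem.List.pyRange 0 n 1).find? (fun j => sig j == sig i)).getD i := by
    intro i hi
    rw [PySem.List.mem_pyRange_one] at hi
    exact pv_leader_full sig n i hi.1 hi.2
  have houter : ∀ j ∈ PySem.List.pyRange 0 n 1,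
      ((pvLeader (fun a b => sig a == sig b) j == j) : Bool)
        = (((PySem.List.pyRange 0 n 1).find? (fun a => sig a == sig j) == some j) : Bool) := by
    intro j hj
    rw [hleadR j hj]
    have hs : ((PySem.List.pyRange 0 n 1).find? (fun a => sig a == sig j)).isSome :=
      List.find?_isSome.mpr ⟨j, hj, by simp⟩
    cases hf : (PySem.List.pyRange 0 n 1).find? (fun a => sig a == sig j) with
    | none => rw [hf] at hs; simp at hs
    | some b => simp
  have hinner : ∀ j ∈ (PySem.List.pyRange 0 n 1).filter
        (fun j => pvLeader (fun a b => sig a == sig b) j == j),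
      (PySem.List.pyRange 0 n 1).filter (fun i => pvLeader (fun a b => sig a == sig b) i == j)
        = (PySem.List.pyRange 0 n 1).filter (fun i => sig i == sig j) := by
    intro j hjf
    have hj := List.mem_of_mem_filter hjf
    have hpj : pvLeader (fun a b => sig a == sig b) j = j := by
      have := List.of_mem_filter hjf
      simpa using this
    have hfj : (PySem.List.pyRange 0 n 1).find? (fun a => sig a == sig j) = some j := by
      have hlj := hleadR j hj
      rw [hpj] at hlj
      cases hf : (PySem.List.pyRange 0 n 1).find? (fun a => sig a == sig j) with
      | none =>
        exfalso
        have hs : ((PySem.List.pyRange 0 n 1).find? (fun a => sig a == sig j)).isSome :=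
          List.find?_isSome.mpr ⟨j, hj, by simp⟩
        rw [hf] at hs; simp at hs
      | some b =>
        rw [hf] at hlj
        simp only [Option.getD_some] at hlj
        rw [← hlj]
    apply List.filter_congr
    intro i hi
    rw [hleadR i hi]
    cases hf : (PySem.List.pyRange 0 n 1).find? (fun a => sig a == sig i) with
    | none =>
      exfalso
      have hs : ((PySem.List.pyRange 0 n 1).find? (fun a => sig a == sig i)).isSome :=
        List.find?_isSome.mpr ⟨i, hi, by simp⟩
      rw [hf] at hs; simp at hs
    | some b =>
      have hbeq : sig b = sig i := by simpa using List.find?_some hf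
      by_cases hs : sig i = sig j
      · have hpred : (fun a => sig a == sig i) = (fun a => sig a == sig j) := by
          funext a; rw [hs]
        rw [hpred] at hf
        rw [hf] at hfj
        simp [hfj, hs]
      · have hbj : b ≠ j := by
          intro h
          exact hs (by rw [← hbeq, h])
        simp [hbj, hs]
  unfold pvBlocks
  rw [List.map_congr_left hinner, List.filter_congr houter]
  rw [pv_dedup_firsts sig (PySem.List.pyRange 0 n 1) (PySem.List.nodup_pyRange_one 0 n)]
  rw [List.map_map, List.map_map]
  apply List.map_congr_left
  intro j hj
  simp only [Function.comp_apply]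
  rw [hget (sig j)]
  exact PySem.List.sorted_eq_self_of_pairwise _ _
    (((PySem.List.pairwise_lt_pyRange_one 0 n).filter _).imp (fun h => le_of_lt h))

theorem pv_main (labels : List Int) (h_ w : Int) :
    mk_rowcol_blocks labels h_ w = mk_rowcol_blocks_alt labels h_ w := by
  unfold mk_rowcol_blocks mk_rowcol_blocks_alt
  have hrow : pvRowEq labels w = (fun a b =>
      (PySem.List.pyRange 0 w 1).map (fun c => PySem.List.pyGetD labels (a * w + c) 0)
        == (PySem.List.pyRange 0 w 1).map (fun c => PySem.List.pyGetD labels (b * w + c) 0)) := by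
    funext a b; exact pv_all_eq_map _ _ _
  have hcol : pvColEq labels h_ w = (fun a b =>
      (PySem.List.pyRange 0 h_ 1).map (fun r => PySem.List.pyGetD labels (r * w + a) 0)
        == (PySem.List.pyRange 0 h_ 1).map (fun r => PySem.List.pyGetD labels (r * w + b) 0)) := by
    funext a b; exact pv_all_eq_map _ _ _
  rw [hrow, hcol,
    ← pv_blocks_eq (fun r => (PySem.List.pyRange 0 w 1).map (fun c => PySem.List.pyGetD labels (r * w + c) 0)) h_,
    ← pv_blocks_eq (fun c => (PySem.List.pyRange 0 h_ 1).map (fun r => PySem.List.pyGetD labels (r * w + c) 0)) w]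

-- ===== VERDICT (by name: the statement is the Claim_ definition above) =====
theorem mk_rowcol_blocks_spec : Claim_equal_mk_rowcol_blocks := by
  intro labels h_ w _ _
  unfold Spec_mk_rowcol_blocks
  exact pv_main labels h_ w
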